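-- pv_equiv track=rewrite | github.com/josephsenior/Grinta-Agent | openhands/metasop/patch_scoring.py | _count_dmp_hunks
-- ===== SOURCE A (Python) =====
-- def _count_dmp_hunks(diffs: list) -> tuple[int, int]:
--     """Count hunks and max hunk size from diffs.
--
--     Args:
--         diffs: List of diff operations
--
--     Returns:
--         Tuple of (hunk_count, max_hunk_chars)
--     """
--     hunks = 0
--     max_hunk_chars = 0
--     cur_hunk_chars = 0
--
--     for op, txt in diffs:
--         if op == 0:  # Equal operation
--             if cur_hunk_chars > 0:
--                 hunks += 1
--                 max_hunk_chars = max(max_hunk_chars, cur_hunk_chars)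
--                 cur_hunk_chars = 0
--         else:
--             cur_hunk_chars += len(txt)
--
--     if cur_hunk_chars > 0:
--         hunks += 1
--         max_hunk_chars = max(max_hunk_chars, cur_hunk_chars)
--
--     return hunks, max_hunk_chars
-- ===== SOURCE B (Python) =====
-- def _count_dmp_hunks(diffs: list) -> tuple[int, int]:
--     """Count hunks and max hunk size from diffs.
--
--     Buckets characters by group id (= number of equal ops seen so far), then
--     aggregates the buckets: no running count/max state, no end-of-loop flush.
--     """
--     buckets = {}
--     gid = 0
--     for op, txt in diffs:
--         if op == 0:
--             gid += 1
--         else: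
--             buckets[gid] = buckets.get(gid, 0) + len(txt)
--     sizes = [c for c in buckets.values() if c > 0]
--     return (len(sizes), max(sizes, default=0))
-- ===== Notes on version B (the rewrite author's own statement) =====
-- stated objective: alternative
-- what changed: Replaces A's stateful scan (running hunk count, running max, pending accumulator flushed on equal ops and again after the loop) by a bucket dictionary keyed by the number of equal ops seen so far: the pass only sums characters into buckets, and count and max are computed afterwards from the positive bucket values.
import Mathlib
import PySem

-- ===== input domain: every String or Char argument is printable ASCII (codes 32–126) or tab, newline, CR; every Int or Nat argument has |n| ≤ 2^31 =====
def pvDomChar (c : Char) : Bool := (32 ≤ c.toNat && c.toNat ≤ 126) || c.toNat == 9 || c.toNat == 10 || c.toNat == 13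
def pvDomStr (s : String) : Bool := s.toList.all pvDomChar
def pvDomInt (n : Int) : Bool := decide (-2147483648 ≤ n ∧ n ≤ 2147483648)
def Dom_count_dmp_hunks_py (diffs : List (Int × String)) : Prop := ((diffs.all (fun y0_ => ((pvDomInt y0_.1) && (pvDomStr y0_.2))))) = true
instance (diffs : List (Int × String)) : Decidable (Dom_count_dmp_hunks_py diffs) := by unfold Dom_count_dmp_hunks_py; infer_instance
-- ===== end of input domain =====

-- B replaces A's stateful scan (running count, running max, pending accumulator flushed on
-- equal ops and after the loop) by a bucket dictionary keyed by the number of equal ops seen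
-- so far; count and max are computed afterwards from the positive bucket values
-- (objective: alternative decomposition, same O(n) cost).

-- ===== PORT A =====
-- loop body of A's for-loop: state (hunks, max_hunk_chars, cur_hunk_chars)
def aStep (st : Int × Int × Int) (p : Int × String) : Int × Int × Int :=
  if p.1 = 0 then
    (if st.2.2 > 0 then (st.1 + 1, max st.2.1 st.2.2, 0) else st)
  else (st.1, st.2.1, st.2.2 + PySem.Str.len p.2)

-- A's trailing 'if cur_hunk_chars > 0' flush
def aFlush (s : Int × Int × Int) : Int × Int :=
  if s.2.2 > 0 then (s.1 + 1, max s.2.1 s.2.2) else (s.1, s.2.1)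

def count_dmp_hunks_py (diffs : List (Int × String)) : Int × Int :=
  aFlush (diffs.foldl aStep (0, 0, 0))

-- ===== PORT B =====
-- Source B's for-loop body: state (buckets, gid); 'buckets[gid] = buckets.get(gid, 0) + len(txt)'
def bStep (st : PySem.Dict Int Int × Int) (p : Int × String) : PySem.Dict Int Int × Int :=
  if p.1 = 0 then (st.1, st.2 + 1)
  else (st.1.insert st.2 (st.1.getD st.2 0 + PySem.Str.len p.2), st.2)

-- buckets pass, then 'sizes = [c for c in buckets.values() if c > 0]' and
-- '(len(sizes), max(sizes, default=0))'
def count_dmp_hunks_py_alt (diffs : List (Int × String)) : Int × Int :=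
  let st := diffs.foldl bStep (PySem.Dict.empty, 0)
  let sizes := st.1.values.filter (fun c => c > 0)
  ((sizes.length : Int), PySem.List.maxD sizes (fun x => x) 0)

-- ===== PRECONDITION & SPEC =====
def Spec_count_dmp_hunks_py (diffs : List (Int × String)) (out : Int × Int) : Prop := out = count_dmp_hunks_py_alt diffs
instance (diffs : List (Int × String)) (out : Int × Int) : Decidable (Spec_count_dmp_hunks_py diffs out) := by unfold Spec_count_dmp_hunks_py; infer_instance

-- ===== CLAIM (what is proved, stated in full; the proofs are below) =====
def Claim_equal_count_dmp_hunks_py : Prop := ∀ (diffs : List (Int × String)), Dom_count_dmp_hunks_py diffs → Spec_count_dmp_hunks_py diffs (count_dmp_hunks_py diffs)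

-- ===== LEMMAS AND PROOFS =====

-- reference decomposition: the char totals of the maximal non-equal runs, in order
def runValues : List (Int × String) → List Int
  | [] => []
  | (op, txt) :: rest =>
    if op = 0 then runValues rest
    else
      (rest.takeWhile (fun y => !(y.1 == 0))).foldl (fun s p => s + PySem.Str.len p.2)
          (PySem.Str.len txt)
        :: runValues (rest.dropWhile (fun y => !(y.1 == 0)))
termination_by l => l.length
decreasing_by
  all_goals simp only [List.length_cons]
  all_goals first
    | omega
    | exact Nat.lt_succ_of_le (List.length_dropWhile_le _ _)

-- the first element surviving dropWhile fails the predicate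
lemma dropWhile_head_false {α : Type} (p : α → Bool) :
    ∀ (l : List α) (x : α) (r : List α), l.dropWhile p = x :: r → p x = false := by
  intro l
  induction l with
  | nil => intro x r h; simp at h
  | cons a as ih =>
    intro x r h
    by_cases ha : p a
    · rw [List.dropWhile_cons_of_pos ha] at h
      exact ih x r h
    · rw [List.dropWhile_cons_of_neg ha] at h
      cases h
      simpa using ha

-- A's fold over a maximal non-equal run only accumulates the run's char lengths
lemma foldA_run (rest : List (Int × String)) (h m c : Int) :
    rest.foldl aStep (h, m, c)
      = (rest.dropWhile (fun y => !(y.1 == 0))).foldl aStep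
          (h, m, (rest.takeWhile (fun y => !(y.1 == 0))).foldl
            (fun s p => s + PySem.Str.len p.2) c) := by
  induction rest generalizing c with
  | nil => simp
  | cons x xs ih =>
    by_cases hx : x.1 = 0
    · have hp : ¬ ((fun y : Int × String => !(y.1 == 0)) x = true) := by simp [hx]
      rw [List.takeWhile_cons_of_neg (p := fun y : Int × String => !(y.1 == 0)) hp,
        List.dropWhile_cons_of_neg (p := fun y : Int × String => !(y.1 == 0)) hp]
      simp
    · have hp : (fun y : Int × String => !(y.1 == 0)) x = true := by simp [hx]
      rw [List.takeWhile_cons_of_pos (p := fun y : Int × String => !(y.1 == 0)) hp,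
        List.dropWhile_cons_of_pos (p := fun y : Int × String => !(y.1 == 0)) hp,
        List.foldl_cons, List.foldl_cons]
      have hs : aStep (h, m, c) x = (h, m, c + PySem.Str.len x.2) := by
        simp [aStep, hx]
      rw [hs]
      exact ih (c + PySem.Str.len x.2)

-- B's fold over a maximal non-equal run accumulates into the same bucket
lemma foldB_run (rest : List (Int × String)) (d : PySem.Dict Int Int) (g c : Int) :
    rest.foldl bStep (d.insert g c, g)
      = (rest.dropWhile (fun y => !(y.1 == 0))).foldl bStep
          (d.insert g ((rest.takeWhile (fun y => !(y.1 == 0))).foldl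
            (fun s p => s + PySem.Str.len p.2) c), g) := by
  induction rest generalizing c with
  | nil => simp
  | cons x xs ih =>
    by_cases hx : x.1 = 0
    · have hp : ¬ ((fun y : Int × String => !(y.1 == 0)) x = true) := by simp [hx]
      rw [List.takeWhile_cons_of_neg (p := fun y : Int × String => !(y.1 == 0)) hp,
        List.dropWhile_cons_of_neg (p := fun y : Int × String => !(y.1 == 0)) hp]
      simp
    · have hp : (fun y : Int × String => !(y.1 == 0)) x = true := by simp [hx]
      rw [List.takeWhile_cons_of_pos (p := fun y : Int × String => !(y.1 == 0)) hp,
        List.dropWhile_cons_of_pos (p := fun y : Int × String => !(y.1 == 0)) hp,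
        List.foldl_cons, List.foldl_cons]
      have hs : bStep (d.insert g c, g) x = (d.insert g (c + PySem.Str.len x.2), g) := by
        simp [bStep, hx, PySem.Dict.getD_insert_self, PySem.Dict.insert_insert_self]
      rw [hs]
      exact ih (c + PySem.Str.len x.2)

-- the char-sum accumulator stays nonnegative
lemma charsFold_nonneg (l : List (Int × String)) (c : Int) (hc : 0 ≤ c) :
    0 ≤ l.foldl (fun s p => s + PySem.Str.len p.2) c := by
  induction l generalizing c with
  | nil => exact hc
  | cons x xs ih =>
    have hx : 0 ≤ PySem.Str.len x.2 := by simp [PySem.Str.len_eq]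
    rw [List.foldl_cons]
    exact ih (c + PySem.Str.len x.2) (by omega)

-- A's whole computation in terms of the run totals
lemma main_A : ∀ (n : Nat) (l : List (Int × String)), l.length ≤ n → ∀ (h m : Int),
    aFlush (l.foldl aStep (h, m, 0))
      = (h + (((runValues l).filter (fun c => c > 0)).length : Int),
         ((runValues l).filter (fun c => c > 0)).foldl max m) := by
  intro n
  induction n with
  | zero =>
    intro l hl h m
    have : l = [] := List.length_eq_zero_iff.mp (Nat.le_zero.mp hl)
    subst this
    simp [runValues, aFlush]
  | succ n ih =>
    intro l hl h m
    match l with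
    | [] => simp [runValues, aFlush]
    | (op, txt) :: rest =>
      have hrest : rest.length ≤ n := by simpa using Nat.lt_succ_iff.mp (Nat.lt_of_lt_of_le (by simp) hl)
      by_cases hop : op = 0
      · subst hop
        have hstep : aStep (h, m, 0) (0, txt) = (h, m, 0) := by simp [aStep]
        have hrv : runValues ((0, txt) :: rest) = runValues rest := by
          rw [runValues]; simp
        rw [List.foldl_cons, hstep, hrv]
        exact ih rest hrest h m
      · have hstep : aStep (h, m, 0) (op, txt) = (h, m, PySem.Str.len txt) := by
          simp [aStep, hop]
        have hrv : runValues ((op, txt) :: rest)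
            = (rest.takeWhile (fun y => !(y.1 == 0))).foldl (fun s p => s + PySem.Str.len p.2)
                (PySem.Str.len txt)
              :: runValues (rest.dropWhile (fun y => !(y.1 == 0))) := by
          rw [runValues]; simp [hop]
        rw [List.foldl_cons, hstep, foldA_run, hrv]
        set chars := (rest.takeWhile (fun y => !(y.1 == 0))).foldl
            (fun s p => s + PySem.Str.len p.2) (PySem.Str.len txt) with hchars
        have hcnn : 0 ≤ chars := charsFold_nonneg _ _ (by simp [PySem.Str.len_eq])
        have hdl : (rest.dropWhile (fun y => !(y.1 == 0))).length ≤ n :=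
          le_trans (List.length_dropWhile_le _ _) hrest
        cases hdw : rest.dropWhile (fun y => !(y.1 == 0)) with
        | nil =>
          by_cases hc : chars > 0
          · simp [aFlush, runValues, hc]
          · have hc0 : chars = 0 := by omega
            simp [aFlush, runValues, hc0]
        | cons x2 r2 =>
          obtain ⟨op2, t2⟩ := x2
          have hop2 : op2 = 0 := by
            have hf := dropWhile_head_false (fun y : Int × String => !(y.1 == 0)) rest (op2, t2) r2 hdw
            simpa using hf
          rw [hdw] at hdl
          have hr2 : r2.length ≤ n := by simp at hdl; omega
          subst hop2
          have hrv2 : runValues ((0, t2) :: r2) = runValues r2 := by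
            rw [runValues]; simp
          by_cases hc : chars > 0
          · have hstep2 : aStep (h, m, chars) (0, t2) = (h + 1, max m chars, 0) := by
              simp [aStep, hc]
            rw [List.foldl_cons, hstep2, ih r2 hr2 (h + 1) (max m chars), hrv2,
              List.filter_cons_of_pos (by simpa using hc)]
            simp only [List.length_cons, List.foldl_cons, Prod.mk.injEq]
            constructor
            · push_cast; ring
            · trivial
          · have hc0 : chars = 0 := by omega
            have hstep2 : aStep (h, m, chars) (0, t2) = (h, m, chars) := by
              simp [aStep, hc]
            rw [List.foldl_cons, hstep2, hrv2,
              List.filter_cons_of_neg (by simpa using hc), hc0]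
            exact ih r2 hr2 h m

-- B's bucket pass collects exactly the run totals as the dict's values
lemma main_B : ∀ (n : Nat) (l : List (Int × String)), l.length ≤ n →
    ∀ (d : PySem.Dict Int Int) (g : Int), d.keys.Nodup → (∀ k ∈ d.keys, k < g) →
    (l.foldl bStep (d, g)).1.values = d.values ++ runValues l := by
  intro n
  induction n with
  | zero =>
    intro l hl d g _ _
    have : l = [] := List.length_eq_zero_iff.mp (Nat.le_zero.mp hl)
    subst this
    simp [runValues]
  | succ n ih =>
    intro l hl d g hnd hlt
    match l with
    | [] => simp [runValues]
    | (op, txt) :: rest =>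
      have hrest : rest.length ≤ n := by simpa using Nat.lt_succ_iff.mp (Nat.lt_of_lt_of_le (by simp) hl)
      by_cases hop : op = 0
      · subst hop
        have hstep : bStep (d, g) (0, txt) = (d, g + 1) := by simp [bStep]
        have hrv : runValues ((0, txt) :: rest) = runValues rest := by
          rw [runValues]; simp
        rw [List.foldl_cons, hstep, hrv]
        exact ih rest hrest d (g + 1) hnd (fun k hk => by have := hlt k hk; omega)
      · have hcont : d.contains g = false := by
          by_contra hcon
          have hct : d.contains g = true := by
            cases hcg : d.contains g
            · exact absurd hcg hcon
            · rfl
          have := hlt g ((PySem.Dict.contains_iff_mem_keys d g).mp hct)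
          omega
        have hstep : bStep (d, g) (op, txt) = (d.insert g (PySem.Str.len txt), g) := by
          simp [bStep, hop, PySem.Dict.getD_of_not_contains d 0 hcont]
        have hrv : runValues ((op, txt) :: rest)
            = (rest.takeWhile (fun y => !(y.1 == 0))).foldl (fun s p => s + PySem.Str.len p.2)
                (PySem.Str.len txt)
              :: runValues (rest.dropWhile (fun y => !(y.1 == 0))) := by
          rw [runValues]; simp [hop]
        rw [List.foldl_cons, hstep, foldB_run, hrv]
        set chars := (rest.takeWhile (fun y => !(y.1 == 0))).foldl
            (fun s p => s + PySem.Str.len p.2) (PySem.Str.len txt) with hchars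
        have hvals : (d.insert g chars).values = d.values ++ [chars] := by
          simp only [PySem.Dict.values, PySem.Dict.items_insert_of_not_contains d chars hcont,
            List.map_append, List.map_cons, List.map_nil]
        have hdl : (rest.dropWhile (fun y => !(y.1 == 0))).length ≤ n :=
          le_trans (List.length_dropWhile_le _ _) hrest
        cases hdw : rest.dropWhile (fun y => !(y.1 == 0)) with
        | nil =>
          simp [hvals, runValues]
        | cons x2 r2 =>
          obtain ⟨op2, t2⟩ := x2
          have hop2 : op2 = 0 := by
            have hf := dropWhile_head_false (fun y : Int × String => !(y.1 == 0)) rest (op2, t2) r2 hdw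
            simpa using hf
          rw [hdw] at hdl
          have hr2 : r2.length ≤ n := by simp at hdl; omega
          subst hop2
          have hrv2 : runValues ((0, t2) :: r2) = runValues r2 := by
            rw [runValues]; simp
          have hstep2 : bStep (d.insert g chars, g) (0, t2) = (d.insert g chars, g + 1) := by
            simp [bStep]
          have hnd' : (d.insert g chars).keys.Nodup := PySem.Dict.nodup_keys_insert d g chars hnd
          have hlt' : ∀ k ∈ (d.insert g chars).keys, k < g + 1 := by
            intro k hk
            rcases (PySem.Dict.mem_keys_insert d g k chars).mp hk with h1 | h2
            · omega
            · have := hlt k h2; omega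
          rw [List.foldl_cons, hstep2, ih r2 hr2 _ (g + 1) hnd' hlt', hvals, hrv2]
          simp

-- max(sizes, default=0) equals A's running max from 0 when every size is positive
lemma maxD_pos (xs : List Int) (hpos : ∀ x ∈ xs, 0 < x) :
    PySem.List.maxD xs (fun x => x) 0 = xs.foldl max 0 := by
  cases xs with
  | nil =>
    have hnone : (PySem.List.max? ([] : List Int) (fun x => x)) = none := by
      simp [PySem.List.max?_eq_none_iff]
    simp [PySem.List.maxD, hnone]
  | cons x t =>
    have hx : 0 < x := hpos x (by simp)
    simp only [PySem.List.maxD, PySem.List.max?_id_cons, Option.getD_some, List.foldl_cons]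
    have : max 0 x = x := by omega
    rw [this]

-- ===== VERDICT (by name: the statement is the Claim_ definition above) =====
theorem count_dmp_hunks_py_spec : Claim_equal_count_dmp_hunks_py := by
  intro diffs _
  unfold Spec_count_dmp_hunks_py count_dmp_hunks_py count_dmp_hunks_py_alt
  have hA := main_A diffs.length diffs le_rfl 0 0
  have hB2 : (diffs.foldl bStep (PySem.Dict.empty, 0)).1.values = runValues diffs := by
    have hB := main_B diffs.length diffs le_rfl PySem.Dict.empty 0
      PySem.Dict.nodup_keys_empty (by simp [PySem.Dict.keys_empty])
    simpa [PySem.Dict.values, PySem.Dict.empty] using hB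
  rw [hA]
  simp only [hB2]
  have hpos : ∀ x ∈ (runValues diffs).filter (fun c => c > 0), 0 < x := by
    intro x hx
    have := List.of_mem_filter hx
    simpa using this
  rw [maxD_pos _ hpos]
  simp
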